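-- pv_equiv track=rewrite | github.com/ranakroychowdhury/Statistical-Machine-Translation | IBM_Model2.py | buildDataStructures
-- ===== SOURCE A (Python) =====
-- def buildDataStructures(eng, esp, eng_list, esp_list):
--     i = 0
--     c_ilm = {}
--     c_jilm = {}
--     q_jilm = {}
--     check = []
--     for esp_sent in esp:
--         eng_sent = eng[i]
--         l = len(eng_sent)
--         m = len(esp_sent)
--         ch = str(l) + ' ' + str(m)
--         if ch not in check:
--             for esp_idx in range(1, m + 1):
--                 key_i = str(esp_idx) + ' ' + ch
--                 c_ilm[key_i] = 0
--                 for eng_idx in range(l):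
--                     key = str(eng_idx) + ' ' + key_i
--                     c_jilm[key] = 0
--                     q_jilm[key] = 0
--             check.append(ch)
--         i += 1
--     count_eng_esp = {}
--     count_eng = {}
--     for eng_word in eng_list:
--         dic_eng_word = {}
--         i = 0
--         for sentence in eng:
--             if eng_word in sentence:
--                 for esp_word in esp[i]:
--                     dic_eng_word[esp_word] = 0
--             i += 1
--         count_eng_esp[eng_word] = dic_eng_word
--         count_eng[eng_word] = 0
--
--     return count_eng_esp, count_eng, c_ilm, c_jilm, q_jilm
-- ===== SOURCE B (Python) =====
-- def buildDataStructures(eng, esp, eng_list, esp_list):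
--     # phase 1: collect the distinct (l, m) length signatures once (keyed by the same
--     # "l m" string A uses), then build the three key dicts from flat key lists.
--     seen = {}
--     for eng_sent, esp_sent in zip(eng, esp):
--         seen.setdefault(str(len(eng_sent)) + ' ' + str(len(esp_sent)),
--                         (len(eng_sent), len(esp_sent)))
--     ikeys = [str(j) + ' ' + ch
--              for ch, (l, m) in seen.items() for j in range(1, m + 1)]
--     jkeys = [str(e) + ' ' + (str(j) + ' ' + ch)
--              for ch, (l, m) in seen.items() for j in range(1, m + 1) for e in range(l)]
--     c_ilm = dict.fromkeys(ikeys, 0)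
--     c_jilm = dict.fromkeys(jkeys, 0)
--     q_jilm = dict.fromkeys(jkeys, 0)
--     # phase 2: inverted indexing — one pass over the sentence pairs instead of one
--     # corpus scan per word of eng_list.
--     count_eng_esp = {w: {} for w in eng_list}
--     for eng_sent, esp_sent in zip(eng, esp):
--         for tok in eng_sent:
--             d = count_eng_esp.get(tok)
--             if d is not None:
--                 for esp_word in esp_sent:
--                     d[esp_word] = 0
--     count_eng = dict.fromkeys(eng_list, 0)
--     return count_eng_esp, count_eng, c_ilm, c_jilm, q_jilm
-- ===== Notes on version B (the rewrite author's own statement) =====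
-- stated objective: faster
-- what changed: Phase one is restructured into staged passes: one setdefault pass collecting the distinct length signatures, then flat key-list comprehensions fed to dict.fromkeys, replacing A's interleaved membership-list check with nested insert loops; phase two is inverted indexing: instead of scanning the whole corpus once per word of eng_list (with repeated esp[i] indexing), B pre-initialises the per-word dicts and makes a single pass over the zipped sentence pairs updating the dict of each tracked token.
import Mathlib
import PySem

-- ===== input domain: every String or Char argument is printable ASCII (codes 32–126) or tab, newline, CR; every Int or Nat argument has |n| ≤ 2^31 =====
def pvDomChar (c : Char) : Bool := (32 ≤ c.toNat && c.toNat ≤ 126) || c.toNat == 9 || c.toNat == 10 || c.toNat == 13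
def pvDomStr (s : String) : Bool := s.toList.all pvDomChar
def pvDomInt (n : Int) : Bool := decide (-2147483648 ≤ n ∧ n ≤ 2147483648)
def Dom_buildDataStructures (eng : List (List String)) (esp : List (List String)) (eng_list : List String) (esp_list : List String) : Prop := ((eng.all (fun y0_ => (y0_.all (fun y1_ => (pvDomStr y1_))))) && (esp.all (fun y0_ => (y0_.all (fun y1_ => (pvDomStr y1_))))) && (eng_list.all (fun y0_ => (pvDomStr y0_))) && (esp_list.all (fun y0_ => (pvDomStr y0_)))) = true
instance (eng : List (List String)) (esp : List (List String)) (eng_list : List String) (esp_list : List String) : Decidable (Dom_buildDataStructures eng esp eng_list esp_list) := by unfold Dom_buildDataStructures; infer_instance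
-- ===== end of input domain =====

-- B stages phase one (signature pass, then flat key lists into fromkeys) and inverts phase two
-- (one pass over sentence pairs instead of one corpus scan per word); return-value equivalence.

-- d[x] = 0 for x in s   (this literal inner loop occurs in both Pythons)
def pvInsertAll (d : PySem.Dict String Int) (s : List String) : PySem.Dict String Int :=
  s.foldl (fun d x => d.insert x 0) d

-- ===== PORT A =====
-- A's key-filling double loop over range(1, m+1) × range(l)
def pvFill (l m : Int) (ch : String)
    (st : PySem.Dict String Int × PySem.Dict String Int × PySem.Dict String Int) :
    PySem.Dict String Int × PySem.Dict String Int × PySem.Dict String Int :=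
  (PySem.List.pyRange 1 (m + 1) 1).foldl (fun st j =>
    let key_i := PySem.Int.toStr j ++ " " ++ ch
    let ci := st.1.insert key_i 0
    let inner := (PySem.List.pyRange 0 l 1).foldl (fun p e =>
      let key := PySem.Int.toStr e ++ " " ++ key_i
      (p.1.insert key 0, p.2.insert key 0)) (st.2.1, st.2.2)
    (ci, inner.1, inner.2)) st

-- phase-one loop body of A: dicts + the 'check' membership LIST
def pvStepA (st : PySem.Dict String Int × PySem.Dict String Int × PySem.Dict String Int × List String)
    (eng_sent esp_sent : List String) :
    PySem.Dict String Int × PySem.Dict String Int × PySem.Dict String Int × List String :=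
  let l : Int := eng_sent.length
  let m : Int := esp_sent.length
  let ch := PySem.Int.toStr l ++ " " ++ PySem.Int.toStr m
  if st.2.2.2.contains ch then st
  else
    let f := pvFill l m ch (st.1, st.2.1, st.2.2.1)
    (f.1, f.2.1, f.2.2, st.2.2.2 ++ [ch])

-- A's inner per-word scan: for sentence in eng: if word in sentence: for esp_word in esp[i]: dic[esp_word] = 0
def pvDicA (eng esp : List (List String)) (w : String) : PySem.Dict String Int × Int :=
  eng.foldl (fun p sent =>
    (if sent.contains w then pvInsertAll p.1 ((PySem.List.pyGet? esp p.2).getD []) else p.1, p.2 + 1))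
    (PySem.Dict.empty, (0 : Int))

def buildDataStructures (eng : List (List String)) (esp : List (List String)) (eng_list : List String) (esp_list : List String) : (List (String × List (String × Int))) × (List (String × Int)) × (List (String × Int)) × (List (String × Int)) × (List (String × Int)) :=
  let s1 := esp.foldl (fun p esp_sent =>
      ((p.1 + 1 : Int), pvStepA p.2 ((PySem.List.pyGet? eng p.1).getD []) esp_sent))
    ((0 : Int), (PySem.Dict.empty, PySem.Dict.empty, PySem.Dict.empty, ([] : List String)))
  let s2 := eng_list.foldl (fun p w =>
      (p.1.insert w (pvDicA eng esp w).1, p.2.insert w (0 : Int)))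
    ((PySem.Dict.empty : PySem.Dict String (PySem.Dict String Int)), (PySem.Dict.empty : PySem.Dict String Int))
  (s2.1.items.map (fun q => (q.1, q.2.items)), s2.2.items,
   s1.2.1.items, s1.2.2.1.items, s1.2.2.2.1.items)

-- ===== PORT B =====
-- the "l m" signature string of a sentence pair
def pvChKey (pr : List String × List String) : String :=
  PySem.Int.toStr (pr.1.length : Int) ++ " " ++ PySem.Int.toStr (pr.2.length : Int)

-- seen.setdefault(ch, (l, m)) over the zipped corpus
def pvSigDict (L : List (List String × List String)) : PySem.Dict String (Int × Int) :=
  L.foldl (fun d pr => d.setdefault (pvChKey pr) ((pr.1.length : Int), (pr.2.length : Int)))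
    PySem.Dict.empty

-- [str(j) + ' ' + ch for j in range(1, m+1)] for one stored signature (ch, (l, m))
def pvIRow (p : String × Int × Int) : List String :=
  (PySem.List.pyRange 1 (p.2.2 + 1) 1).map (fun j => PySem.Int.toStr j ++ " " ++ p.1)

-- [str(e) + ' ' + (str(j) + ' ' + ch) for j in range(1, m+1) for e in range(l)]
def pvJRow (p : String × Int × Int) : List String :=
  (PySem.List.pyRange 1 (p.2.2 + 1) 1).flatMap (fun j =>
    (PySem.List.pyRange 0 p.2.1 1).map (fun e =>
      PySem.Int.toStr e ++ " " ++ (PySem.Int.toStr j ++ " " ++ p.1)))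

-- dict.fromkeys(ks, v): d[k] = v for k in ks
def pvFromKeys (ks : List String) (v : Int) : PySem.Dict String Int :=
  ks.foldl (fun d k => d.insert k v) PySem.Dict.empty

-- B's single-pass update: for tok in eng_sent: d = count_eng_esp.get(tok); if d is not None: d[esp_word] = 0 …
def pvUpdateSent (cee : PySem.Dict String (PySem.Dict String Int)) (pr : List String × List String) :
    PySem.Dict String (PySem.Dict String Int) :=
  pr.1.foldl (fun cee tok =>
    match cee.get? tok with
    | none => cee
    | some d => cee.insert tok (pvInsertAll d pr.2)) cee

def buildDataStructures_alt (eng : List (List String)) (esp : List (List String)) (eng_list : List String) (esp_list : List String) : (List (String × List (String × Int))) × (List (String × Int)) × (List (String × Int)) × (List (String × Int)) × (List (String × Int)) :=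
  let sd := pvSigDict (eng.zip esp)
  let ikeys := sd.items.flatMap pvIRow
  let jkeys := sd.items.flatMap pvJRow
  let cee := (eng.zip esp).foldl pvUpdateSent
    (eng_list.foldl (fun d w => d.insert w (PySem.Dict.empty : PySem.Dict String Int))
      (PySem.Dict.empty : PySem.Dict String (PySem.Dict String Int)))
  (cee.items.map (fun q => (q.1, q.2.items)),
   (pvFromKeys eng_list 0).items,
   (pvFromKeys ikeys 0).items,
   (pvFromKeys jkeys 0).items,
   (pvFromKeys jkeys 0).items)

-- ===== PRECONDITION & SPEC =====
-- Pre_ excludes exactly the inputs on which A raises IndexError: esp longer than eng (eng[i] in phase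
-- one), or an eng_list word occurring in an eng sentence beyond esp's length (esp[i] in phase two).
def Pre_buildDataStructures (eng : List (List String)) (esp : List (List String)) (eng_list : List String) (esp_list : List String) : Prop :=
  esp.length ≤ eng.length ∧ ∀ w ∈ eng_list, ∀ sent ∈ eng.drop esp.length, w ∉ sent
instance (eng : List (List String)) (esp : List (List String)) (eng_list : List String) (esp_list : List String) : Decidable (Pre_buildDataStructures eng esp eng_list esp_list) := by unfold Pre_buildDataStructures; infer_instance

def pvWitness_buildDataStructures : List (List String) × List (List String) × List String × List String :=
  ([["the", "dog"]], [["el", "perro"]], ["dog", "cat"], ["perro"])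

def Spec_buildDataStructures (eng : List (List String)) (esp : List (List String)) (eng_list : List String) (esp_list : List String) (out : (List (String × List (String × Int))) × (List (String × Int)) × (List (String × Int)) × (List (String × Int)) × (List (String × Int))) : Prop := out = buildDataStructures_alt eng esp eng_list esp_list
instance (eng : List (List String)) (esp : List (List String)) (eng_list : List String) (esp_list : List String) (out : (List (String × List (String × Int))) × (List (String × Int)) × (List (String × Int)) × (List (String × Int)) × (List (String × Int))) : Decidable (Spec_buildDataStructures eng esp eng_list esp_list out) := by
  unfold Spec_buildDataStructures
  letI i1 : DecidableEq (List (String × Int)) := by infer_instance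
  infer_instance

-- ===== CLAIM (what is proved, stated in full; the proofs are below) =====
def Claim_equal_buildDataStructures : Prop := ∀ (eng : List (List String)) (esp : List (List String)) (eng_list : List String) (esp_list : List String), Dom_buildDataStructures eng esp eng_list esp_list → Pre_buildDataStructures eng esp eng_list esp_list → Spec_buildDataStructures eng esp eng_list esp_list (buildDataStructures eng esp eng_list esp_list)

-- ===== LEMMAS AND PROOFS =====

theorem pv_insertAll_append (d : PySem.Dict String Int) (a b : List String) :
    pvInsertAll d (a ++ b) = pvInsertAll (pvInsertAll d a) b := by
  simp [pvInsertAll, List.foldl_append]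

theorem pv_fromKeys_append (a b : List String) :
    pvFromKeys (a ++ b) 0 = pvInsertAll (pvFromKeys a 0) b := by
  simp [pvFromKeys, pvInsertAll, List.foldl_append]

-- A's fill loop, characterised as three bulk key insertions
theorem pv_fill_eq (l m : Int) (ch : String)
    (st : PySem.Dict String Int × PySem.Dict String Int × PySem.Dict String Int) :
    pvFill l m ch st =
      (pvInsertAll st.1 (pvIRow (ch, l, m)),
       pvInsertAll st.2.1 (pvJRow (ch, l, m)),
       pvInsertAll st.2.2 (pvJRow (ch, l, m))) := by
  unfold pvFill pvIRow pvJRow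
  simp only []
  generalize PySem.List.pyRange 1 (m + 1) 1 = R
  induction R generalizing st with
  | nil => simp [pvInsertAll]
  | cons j R ih =>
    obtain ⟨c, cj, q⟩ := st
    simp only [List.foldl_cons, List.map_cons, List.flatMap_cons]
    rw [PySem.List.foldl_prod_mk
        (fun d (e : Int) => d.insert (PySem.Int.toStr e ++ " " ++ (PySem.Int.toStr j ++ " " ++ ch)) 0)
        (fun d (e : Int) => d.insert (PySem.Int.toStr e ++ " " ++ (PySem.Int.toStr j ++ " " ++ ch)) 0)
        (PySem.List.pyRange 0 l 1) cj q]
    rw [ih]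
    have hrow : ∀ (d : PySem.Dict String Int),
        (PySem.List.pyRange 0 l 1).foldl
          (fun d e => d.insert (PySem.Int.toStr e ++ " " ++ (PySem.Int.toStr j ++ " " ++ ch)) 0) d
        = pvInsertAll d ((PySem.List.pyRange 0 l 1).map
            (fun e => PySem.Int.toStr e ++ " " ++ (PySem.Int.toStr j ++ " " ++ ch))) := by
      intro d; rw [pvInsertAll, List.foldl_map]
    rw [hrow cj, hrow q, ← pv_insertAll_append, ← pv_insertAll_append]
    rfl

-- phase one of A over the zipped corpus = B's staged construction (signature dict, flat key lists)
theorem pv_phase1 (L : List (List String × List String)) :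
    L.foldl (fun s pr => pvStepA s pr.1 pr.2)
      (PySem.Dict.empty, PySem.Dict.empty, PySem.Dict.empty, ([] : List String))
    = (pvFromKeys ((pvSigDict L).items.flatMap pvIRow) 0,
       pvFromKeys ((pvSigDict L).items.flatMap pvJRow) 0,
       pvFromKeys ((pvSigDict L).items.flatMap pvJRow) 0,
       (pvSigDict L).keys) := by
  induction L using List.reverseRecOn with
  | nil => rfl
  | append_singleton L pr ih =>
    have hsig : pvSigDict (L ++ [pr]) =
        (pvSigDict L).setdefault (pvChKey pr) ((pr.1.length : Int), (pr.2.length : Int)) := by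
      simp [pvSigDict, List.foldl_append]
    rw [List.foldl_append, List.foldl_cons, List.foldl_nil, ih]
    by_cases hc : (pvSigDict L).contains (pvChKey pr) = true
    · have hmem : (pvChKey pr) ∈ (pvSigDict L).keys :=
        (PySem.Dict.contains_iff_mem_keys _ _).mp hc
      have hguard : ((pvSigDict L).keys).contains (pvChKey pr) = true := by
        simpa using hmem
      rw [hsig, PySem.Dict.setdefault_of_contains _ _ hc]
      unfold pvStepA
      simp only [pvChKey] at hguard
      rw [if_pos hguard]
    · have hnmem : (pvChKey pr) ∉ (pvSigDict L).keys := fun h =>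
        hc ((PySem.Dict.contains_iff_mem_keys _ _).mpr h)
      have hguard : ((pvSigDict L).keys).contains (pvChKey pr) = false := by
        simpa using hnmem
      rw [hsig, PySem.Dict.setdefault_of_not_contains _ _ (by simpa using hc)]
      have hcontains : (pvSigDict L).contains (pvChKey pr) = false := by simpa using hc
      rw [PySem.Dict.items_insert_of_not_contains _ _ hcontains,
          PySem.Dict.keys_insert_of_not_contains _ _ hcontains]
      unfold pvStepA
      simp only [pvChKey] at hguard
      rw [if_neg (by simpa [pvChKey] using hnmem)]
      rw [pv_fill_eq]
      simp only [List.flatMap_append, List.flatMap_cons, List.flatMap_nil, List.append_nil]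
      rw [pv_fromKeys_append, pv_fromKeys_append]
      rfl

-- map-replace is the identity when the first match already carries the stored value
theorem pv_map_replace {ν : Type} (k : String) (v : ν) :
    ∀ (l : List (String × ν)), (l.map Prod.fst).Nodup →
      (l.find? (fun p => p.1 == k)).map Prod.snd = some v →
      l.map (fun p => if p.1 == k then (k, v) else p) = l := by
  intro l
  induction l with
  | nil => intro _ h; simp [List.find?] at h
  | cons p t ih =>
    intro hnd h
    by_cases hk : p.1 = k
    · have hfind : (p :: t).find? (fun q => q.1 == k) = some p := by
        simp [List.find?_cons_of_pos, hk]
      rw [hfind] at h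
      have hv : p.2 = v := by simpa using h
      have hnotin : ∀ q ∈ t, q.1 ≠ k := by
        intro q hq
        have := (List.nodup_cons.mp hnd).1
        intro hqk
        exact this (by rw [hk, ← hqk]; exact List.mem_map_of_mem hq)
      have htail : t.map (fun q => if q.1 == k then (k, v) else q) = t := by
        have h2 : ∀ q ∈ t, (if q.1 == k then (k, v) else q) = q := by
          intro q hq; simp [hnotin q hq]
        rw [List.map_congr_left h2]; exact List.map_id t
      rw [List.map_cons, htail, if_pos (by simp [hk]), ← hv, ← hk]
    · have hfind : (p :: t).find? (fun q => q.1 == k) = t.find? (fun q => q.1 == k) := by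
        simp [List.find?_cons_of_neg, hk]
      rw [hfind] at h
      have h3 := ih (List.nodup_cons.mp hnd).2 h
      rw [List.map_cons, h3, if_neg (by simp [hk])]

-- Python 'd[k] = v' is a no-op when d already maps k to v (nodup keys)
theorem pv_insert_noop {ν : Type} (d : PySem.Dict String ν) (k : String) (v : ν)
    (hnd : d.keys.Nodup) (h : d.get? k = some v) : d.insert k v = d := by
  have hc : d.contains k = true := by
    rw [PySem.Dict.contains_eq_isSome_get?, h]; rfl
  unfold PySem.Dict.insert
  rw [if_pos hc]
  cases d with
  | mk items =>
    congr 1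
    exact pv_map_replace k v items hnd (by simpa [PySem.Dict.get?] using h)

theorem pv_get?_insertAll (s : List String) (d : PySem.Dict String Int) (x : String) :
    (pvInsertAll d s).get? x = if x ∈ s then some 0 else d.get? x := by
  induction s generalizing d with
  | nil => simp [pvInsertAll]
  | cons a s ih =>
    show (pvInsertAll (d.insert a 0) s).get? x = _
    rw [ih]
    by_cases hx : x ∈ s
    · simp [hx]
    · by_cases hxa : x = a
      · simp [hx, hxa, PySem.Dict.get?_insert]
      · simp [hx, hxa, PySem.Dict.get?_insert]

theorem pv_nodup_keys_insertAll (s : List String) (d : PySem.Dict String Int)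
    (hnd : d.keys.Nodup) : (pvInsertAll d s).keys.Nodup :=
  PySem.Dict.nodup_keys_foldl_insert s (fun _ _ => 0) d hnd

theorem pv_insertAll_noop (s : List String) (d : PySem.Dict String Int)
    (hnd : d.keys.Nodup) (h : ∀ x ∈ s, d.get? x = some 0) : pvInsertAll d s = d := by
  induction s generalizing d with
  | nil => rfl
  | cons a s ih =>
    show pvInsertAll (d.insert a 0) s = d
    rw [pv_insert_noop d a 0 hnd (h a (by simp))]
    exact ih d hnd (fun x hx => h x (by simp [hx]))

-- a duplicated token in a sentence re-inserts the same zeros: idempotent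
theorem pv_insertAll_idem (s : List String) (d : PySem.Dict String Int)
    (hnd : d.keys.Nodup) : pvInsertAll (pvInsertAll d s) s = pvInsertAll d s := by
  apply pv_insertAll_noop
  · exact pv_nodup_keys_insertAll s d hnd
  · intro x hx; rw [pv_get?_insertAll]; simp [hx]

-- one sentence of B's pass: its effect on the entry of one word w
theorem pv_get?_updateSent (e s : List String) (cee : PySem.Dict String (PySem.Dict String Int))
    (w : String) (hnd : cee.keys.Nodup)
    (hvals : ∀ k dv, cee.get? k = some dv → dv.keys.Nodup) :
    (pvUpdateSent cee (e, s)).get? w =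
      if w ∈ e then (cee.get? w).map (fun d => pvInsertAll d s) else cee.get? w := by
  induction e generalizing cee with
  | nil => simp [pvUpdateSent]
  | cons t e ih =>
    have hstep : pvUpdateSent cee (t :: e, s) = pvUpdateSent (match cee.get? t with
        | none => cee
        | some d => cee.insert t (pvInsertAll d s)) (e, s) := rfl
    rw [hstep]
    rcases hg : cee.get? t with _ | d
    · simp only [hg]
      rw [ih cee hnd hvals]
      by_cases hw : w = t
      · subst hw; simp [hg]
      · simp [hw]
    · simp only [hg]
      have hc : cee.contains t = true := by rw [PySem.Dict.contains_eq_isSome_get?, hg]; rfl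
      have hnd' : (cee.insert t (pvInsertAll d s)).keys.Nodup := by
        rw [PySem.Dict.keys_insert_of_contains _ _ hc]; exact hnd
      have hvals' : ∀ k dv, (cee.insert t (pvInsertAll d s)).get? k = some dv → dv.keys.Nodup := by
        intro k dv hk
        rw [PySem.Dict.get?_insert] at hk
        by_cases hkt : k = t
        · rw [if_pos hkt] at hk
          cases hk
          exact pv_nodup_keys_insertAll s d (hvals t d hg)
        · rw [if_neg hkt] at hk; exact hvals k dv hk
      rw [ih _ hnd' hvals']
      by_cases hw : w = t
      · subst hw
        have hgw : (cee.insert w (pvInsertAll d s)).get? w = some (pvInsertAll d s) :=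
          PySem.Dict.get?_insert_self _ _ _
        by_cases he : w ∈ e
        · simp [he, hgw, hg, pv_insertAll_idem s d (hvals w d hg)]
        · simp [he, hgw, hg]
      · have hgw : (cee.insert t (pvInsertAll d s)).get? w = cee.get? w := by
          simp [PySem.Dict.get?_insert, hw]
        simp [hgw, hw]

theorem pv_keys_updateSent (cee : PySem.Dict String (PySem.Dict String Int))
    (pr : List String × List String) : (pvUpdateSent cee pr).keys = cee.keys := by
  obtain ⟨e, s⟩ := pr
  induction e generalizing cee with
  | nil => rfl
  | cons t e ih =>
    have hstep : pvUpdateSent cee (t :: e, s) = pvUpdateSent (match cee.get? t with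
        | none => cee
        | some d => cee.insert t (pvInsertAll d s)) (e, s) := rfl
    rw [hstep]
    rcases hg : cee.get? t with _ | d
    · simp only [hg]; exact ih cee
    · simp only [hg]
      rw [ih]
      have hc : cee.contains t = true := by rw [PySem.Dict.contains_eq_isSome_get?, hg]; rfl
      exact PySem.Dict.keys_insert_of_contains _ _ hc

theorem pv_keys_foldlUpdate (L : List (List String × List String))
    (cee : PySem.Dict String (PySem.Dict String Int)) :
    (L.foldl pvUpdateSent cee).keys = cee.keys := by
  induction L generalizing cee with
  | nil => rfl
  | cons pr L ih => rw [List.foldl_cons, ih, pv_keys_updateSent]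

-- B's whole pass, seen from the entry of one word w
theorem pv_get?_foldlUpdate (L : List (List String × List String))
    (cee : PySem.Dict String (PySem.Dict String Int)) (w : String)
    (hnd : cee.keys.Nodup)
    (hvals : ∀ k dv, cee.get? k = some dv → dv.keys.Nodup) :
    (L.foldl pvUpdateSent cee).get? w =
      (cee.get? w).map (fun d =>
        L.foldl (fun d pr => if pr.1.contains w then pvInsertAll d pr.2 else d) d) := by
  induction L generalizing cee with
  | nil => rcases h : cee.get? w <;> simp [h]
  | cons pr L ih =>
    obtain ⟨e, s⟩ := pr
    rw [List.foldl_cons]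
    have hnd' : (pvUpdateSent cee (e, s)).keys.Nodup := by rw [pv_keys_updateSent]; exact hnd
    have hvals' : ∀ k dv, (pvUpdateSent cee (e, s)).get? k = some dv → dv.keys.Nodup := by
      intro k dv hk
      rw [pv_get?_updateSent e s cee k hnd hvals] at hk
      by_cases hke : k ∈ e
      · rw [if_pos hke] at hk
        rcases hg : cee.get? k with _ | d0
        · rw [hg] at hk; simp at hk
        · rw [hg] at hk; simp at hk; subst hk; exact pv_nodup_keys_insertAll s d0 (hvals k d0 hg)
      · rw [if_neg hke] at hk; exact hvals k dv hk
    rw [ih _ hnd' hvals', pv_get?_updateSent e s cee w hnd hvals]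
    by_cases he : w ∈ e
    · rw [if_pos he]
      rcases h : cee.get? w with _ | d0 <;> simp [List.foldl_cons, he]
    · rw [if_neg he]
      rcases h : cee.get? w with _ | d0 <;> simp [List.foldl_cons, he]

-- a fold of inserts whose value depends only on the key, read back
theorem pv_get?_foldl_insert_fun {ν : Type} (l : List String) (F : String → ν)
    (d0 : PySem.Dict String ν) (w : String) :
    (l.foldl (fun d x => d.insert x (F x)) d0).get? w = if w ∈ l then some (F w) else d0.get? w := by
  induction l generalizing d0 with
  | nil => simp
  | cons x l ih =>
    rw [List.foldl_cons, ih]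
    by_cases hl : w ∈ l
    · simp [hl]
    · by_cases hx : w = x
      · subst hx; simp [hl, PySem.Dict.get?_insert]
      · simp [hl, hx, PySem.Dict.get?_insert]

theorem pv_zip_take {α β : Type} (xs : List α) (ys : List β) (h : ys.length ≤ xs.length) :
    (xs.take ys.length).zip ys = xs.zip ys := by
  induction ys generalizing xs with
  | nil => simp
  | cons y ys ih =>
    cases xs with
    | nil => simp at h
    | cons x xs => simp_all [List.zip_cons_cons]

theorem pv_dicA_prefix (w : String) (esp : List (List String)) :
    ∀ (E : List (List String)) (k : Nat) (d : PySem.Dict String Int),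
      k + E.length ≤ esp.length →
      E.foldl (fun p sent =>
          (if sent.contains w then pvInsertAll p.1 ((PySem.List.pyGet? esp p.2).getD []) else p.1, p.2 + 1))
        (d, (k : Int))
      = ((E.zip (esp.drop k)).foldl
          (fun d pr => if pr.1.contains w then pvInsertAll d pr.2 else d) d, ((k : Int) + E.length)) := by
  intro E
  induction E with
  | nil => intro k d _; simp
  | cons e E ih =>
    intro k d h
    have hk : k < esp.length := by simp at h; omega
    rw [List.foldl_cons]
    have hget : (PySem.List.pyGet? esp (k : Int)).getD [] = esp[k] := by
      rw [PySem.List.pyGet?_natCast, List.getElem?_eq_getElem hk]; rfl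
    have hcast : ((k : Int) + 1) = ((k + 1 : Nat) : Int) := by push_cast; ring
    rw [hget, hcast, ih (k + 1) _ (by simp at h ⊢; omega)]
    rw [List.drop_eq_getElem_cons hk, List.zip_cons_cons, List.foldl_cons]
    refine Prod.ext rfl ?_
    simp; ring

theorem pv_dicA_suffix (w : String) (esp : List (List String)) :
    ∀ (E : List (List String)) (d : PySem.Dict String Int) (i : Int),
      (∀ sent ∈ E, w ∉ sent) →
      E.foldl (fun p sent =>
          (if sent.contains w then pvInsertAll p.1 ((PySem.List.pyGet? esp p.2).getD []) else p.1, p.2 + 1))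
        (d, i) = (d, i + E.length) := by
  intro E
  induction E with
  | nil => intro d i _; simp
  | cons e E ih =>
    intro d i h
    have he : e.contains w = false := by simp [h e (by simp)]
    rw [List.foldl_cons]
    simp only [he, Bool.false_eq_true, if_false]
    rw [ih d (i + 1) (fun s hs => h s (by simp [hs]))]
    simp; ring

-- A's per-word scan equals the zip fold, under Pre_
theorem pv_dicA_eq (eng esp : List (List String)) (w : String)
    (h : esp.length ≤ eng.length)
    (h2 : ∀ sent ∈ eng.drop esp.length, w ∉ sent) :
    (pvDicA eng esp w).1 =
      (eng.zip esp).foldl (fun d pr => if pr.1.contains w then pvInsertAll d pr.2 else d)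
        PySem.Dict.empty := by
  unfold pvDicA
  conv_lhs => rw [← List.take_append_drop esp.length eng]
  rw [List.foldl_append]
  have hlen : (eng.take esp.length).length = esp.length := by simp [h]
  have hpre := pv_dicA_prefix w esp (eng.take esp.length) 0 PySem.Dict.empty (by simp [hlen])
  simp only [Nat.cast_zero, List.drop_zero, zero_add] at hpre
  rw [hpre, pv_dicA_suffix w esp _ _ _ (fun s hs => h2 s hs)]
  rw [← pv_zip_take eng esp h, hlen]

theorem pv_part1_aux (eng : List (List String)) :
    ∀ (esp : List (List String)) (k : Nat)
      (s : PySem.Dict String Int × PySem.Dict String Int × PySem.Dict String Int × List String),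
      k + esp.length ≤ eng.length →
      esp.foldl (fun p esp_sent =>
          ((p.1 + 1 : Int), pvStepA p.2 ((PySem.List.pyGet? eng p.1).getD []) esp_sent))
        ((k : Int), s)
      = (((k + esp.length : Nat) : Int),
         ((eng.drop k).zip esp).foldl (fun s pr => pvStepA s pr.1 pr.2) s) := by
  intro esp
  induction esp with
  | nil => intro k s _; simp
  | cons es esp ih =>
    intro k s h
    have hk : k < eng.length := by simp at h; omega
    rw [List.foldl_cons]
    have hget : (PySem.List.pyGet? eng (k : Int)).getD [] = eng[k] := by
      rw [PySem.List.pyGet?_natCast, List.getElem?_eq_getElem hk]; rfl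
    have hcast : ((k : Int) + 1) = ((k + 1 : Nat) : Int) := by push_cast; ring
    rw [hget, hcast, ih (k + 1) _ (by simp at h ⊢; omega)]
    rw [List.drop_eq_getElem_cons hk, List.zip_cons_cons, List.foldl_cons]
    refine Prod.ext ?_ rfl
    simp; omega

-- phase one: A's indexed loop = the zip fold of pvStepA
theorem pv_part1 (eng esp : List (List String)) (h : esp.length ≤ eng.length) :
    (esp.foldl (fun p esp_sent =>
        ((p.1 + 1 : Int), pvStepA p.2 ((PySem.List.pyGet? eng p.1).getD []) esp_sent))
      ((0 : Int), (PySem.Dict.empty, PySem.Dict.empty, PySem.Dict.empty, ([] : List String)))).2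
    = (eng.zip esp).foldl (fun s pr => pvStepA s pr.1 pr.2)
        (PySem.Dict.empty, PySem.Dict.empty, PySem.Dict.empty, ([] : List String)) := by
  have h0 := pv_part1_aux eng esp 0
    (PySem.Dict.empty, PySem.Dict.empty, PySem.Dict.empty, ([] : List String)) (by simpa using h)
  simp only [Nat.cast_zero, List.drop_zero, zero_add] at h0
  rw [h0]

-- phase two: A's per-word corpus scans = B's single inverted pass
theorem pv_part2 (eng esp : List (List String)) (eng_list : List String)
    (h : esp.length ≤ eng.length)
    (h2 : ∀ w ∈ eng_list, ∀ sent ∈ eng.drop esp.length, w ∉ sent) :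
    eng_list.foldl (fun d w => d.insert w (pvDicA eng esp w).1)
      (PySem.Dict.empty : PySem.Dict String (PySem.Dict String Int))
    = (eng.zip esp).foldl pvUpdateSent
        (eng_list.foldl (fun d w => d.insert w (PySem.Dict.empty : PySem.Dict String Int))
          (PySem.Dict.empty : PySem.Dict String (PySem.Dict String Int))) := by
  have hk0 : (eng_list.foldl (fun d w => d.insert w (PySem.Dict.empty : PySem.Dict String Int))
      (PySem.Dict.empty : PySem.Dict String (PySem.Dict String Int))).keys = PySem.Set.ofList eng_list := by
    rw [PySem.Dict.keys_foldl_insert eng_list (fun _ _ => PySem.Dict.empty)]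
    exact PySem.Set.update_nil_left eng_list
  have hkA : (eng_list.foldl (fun d w => d.insert w (pvDicA eng esp w).1)
      (PySem.Dict.empty : PySem.Dict String (PySem.Dict String Int))).keys = PySem.Set.ofList eng_list := by
    rw [PySem.Dict.keys_foldl_insert eng_list (fun _ w => (pvDicA eng esp w).1)]
    exact PySem.Set.update_nil_left eng_list
  have hndA : (eng_list.foldl (fun d w => d.insert w (pvDicA eng esp w).1)
      (PySem.Dict.empty : PySem.Dict String (PySem.Dict String Int))).keys.Nodup := by
    rw [hkA]; exact PySem.Set.nodup_ofList eng_list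
  have hnd0 : (eng_list.foldl (fun d w => d.insert w (PySem.Dict.empty : PySem.Dict String Int))
      (PySem.Dict.empty : PySem.Dict String (PySem.Dict String Int))).keys.Nodup := by
    rw [hk0]; exact PySem.Set.nodup_ofList eng_list
  have hvals0 : ∀ k dv, (eng_list.foldl (fun d w => d.insert w (PySem.Dict.empty : PySem.Dict String Int))
      (PySem.Dict.empty : PySem.Dict String (PySem.Dict String Int))).get? k = some dv → dv.keys.Nodup := by
    intro k dv hk
    rw [pv_get?_foldl_insert_fun eng_list (fun _ => PySem.Dict.empty)] at hk
    by_cases hmem : k ∈ eng_list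
    · rw [if_pos hmem] at hk; cases hk; simp
    · rw [if_neg hmem] at hk; simp [PySem.Dict.get?_empty] at hk
  have hndB : ((eng.zip esp).foldl pvUpdateSent
      (eng_list.foldl (fun d w => d.insert w (PySem.Dict.empty : PySem.Dict String Int))
        (PySem.Dict.empty : PySem.Dict String (PySem.Dict String Int)))).keys.Nodup := by
    rw [pv_keys_foldlUpdate]; exact hnd0
  apply PySem.Dict.ext
  rw [PySem.Dict.items_eq_map_keys _ hndA PySem.Dict.empty,
      PySem.Dict.items_eq_map_keys _ hndB PySem.Dict.empty,
      hkA, pv_keys_foldlUpdate, hk0]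
  apply List.map_congr_left
  intro w hw
  have hwl : w ∈ eng_list := (PySem.Set.mem_ofList eng_list w).mp hw
  refine Prod.ext rfl ?_
  rw [PySem.Dict.getD_eq_get?_getD, PySem.Dict.getD_eq_get?_getD]
  rw [pv_get?_foldl_insert_fun eng_list (fun w => (pvDicA eng esp w).1), if_pos hwl]
  rw [pv_get?_foldlUpdate _ _ _ hnd0 hvals0]
  rw [pv_get?_foldl_insert_fun eng_list (fun _ => PySem.Dict.empty), if_pos hwl]
  simp only [Option.map_some, Option.getD_some]
  exact pv_dicA_eq eng esp w h (h2 w hwl)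

-- ===== VERDICT (by name: the statement is the Claim_ definition above) =====
theorem buildDataStructures_spec : Claim_equal_buildDataStructures := by
  intro eng esp eng_list esp_list _ hpre
  obtain ⟨h, h2⟩ := hpre
  unfold Spec_buildDataStructures buildDataStructures buildDataStructures_alt
  simp only []
  rw [PySem.List.foldl_prod_mk
        (fun d (w : String) => d.insert w (pvDicA eng esp w).1)
        (fun d (w : String) => d.insert w (0 : Int)) eng_list PySem.Dict.empty PySem.Dict.empty]
  rw [pv_part1 eng esp h, pv_phase1, pv_part2 eng esp eng_list h h2]
  rfl
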